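-- pv_equiv track=rewrite | github.com/PaddlePaddle/PaddleNLP | examples/few_shot/RGL/tokenizer.py | truncate_by_manual
-- ===== SOURCE A (Python) =====
-- from collections import defaultdict
--
-- def truncate_by_manual(input_dict, max_len_list=[]):
--     """
--     Truncate input data by manually defined maximum sequence length.
--
--     Args:
--         input_dict (dict):
--             The dictionary of an input example.
--         max_len_list (list):
--             The maximum length of every part in example.
--             ``-1`` denotes that there is no limit on length.
--     """
--     truncated_dict = defaultdict(list)
--     shortenable_ids = input_dict['shortenable_ids']
--     truncated_dict['shortenable_ids'] = shortenable_ids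
--     for attr_name, attr_values in input_dict.items():
--         text_idx = 0
--         for i, value in enumerate(attr_values):
--             if shortenable_ids[i][0] == 0:
--                 continue
--             if text_idx >= len(max_len_list):
--                 break
--             if len(value) > 0:
--                 max_len = max_len_list[text_idx]
--                 if max_len < 0:
--                     attr_values[i] = value
--                 else:
--                     attr_values[i] = value[:max_len]
--             text_idx += 1
--         truncated_dict[attr_name] = attr_values
--     return truncated_dict
-- ===== SOURCE B (Python) =====
-- def truncate_by_manual(input_dict, max_len_list=[]):
--     """Precompute one per-position limit (None = leave unchanged) for the
--     shortenable positions in a single pass, then rebuild every field with one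
--     map.  Returns a fresh dict with fresh lists: unlike the original it does
--     NOT truncate the input lists in place (return value is the same)."""
--     sids = input_dict['shortenable_ids']
--     lims = []
--     t = 0
--     for sid in sids:
--         if sid[0] != 0:
--             if t >= len(max_len_list):
--                 break
--             lims.append(max_len_list[t])
--             t += 1
--         else:
--             lims.append(None)
--
--     def cut(vs):
--         return [v if i >= len(lims) or lims[i] is None or len(v) == 0 or lims[i] < 0
--                 else v[:lims[i]]
--                 for i, v in enumerate(vs)]
--
--     out = {'shortenable_ids': cut(sids)}
--     for k, vs in input_dict.items():
--         out[k] = cut(vs)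
--     return out
-- ===== Notes on version B (the rewrite author's own statement) =====
-- stated objective: alternative
-- what changed: A re-derives the max_len consumption (text_idx walk with break) inside every attribute's loop and truncates the shared lists in place; B computes a per-position limit table from shortenable_ids once in a single pass and then rebuilds every attribute with one map over that table, returning fresh lists (return value only; B does not mutate the input in place as A does).
import Mathlib
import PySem

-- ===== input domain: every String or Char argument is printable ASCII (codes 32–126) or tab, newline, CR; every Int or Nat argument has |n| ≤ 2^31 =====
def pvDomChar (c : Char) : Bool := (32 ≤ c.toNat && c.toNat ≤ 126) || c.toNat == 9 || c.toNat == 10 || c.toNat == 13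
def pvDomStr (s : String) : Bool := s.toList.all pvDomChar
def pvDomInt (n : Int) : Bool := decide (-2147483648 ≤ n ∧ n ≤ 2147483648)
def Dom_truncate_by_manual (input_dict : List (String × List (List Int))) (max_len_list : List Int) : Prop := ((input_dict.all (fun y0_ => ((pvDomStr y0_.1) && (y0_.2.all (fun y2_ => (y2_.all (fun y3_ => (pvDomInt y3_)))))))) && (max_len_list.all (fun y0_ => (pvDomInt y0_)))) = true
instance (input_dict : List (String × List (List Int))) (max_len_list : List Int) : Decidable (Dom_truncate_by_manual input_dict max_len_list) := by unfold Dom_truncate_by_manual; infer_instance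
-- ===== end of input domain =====

-- B replaces A's per-attribute text_idx/break walk (which truncates the shared lists in
-- place) by one precomputed per-position limit table and a single map per attribute;
-- equivalence is about the RETURN value only (Python A also mutates its input in place).

-- ===== PORT A =====
-- `d[k]`: first-match association-list lookup (= Python dict lookup; keys are unique in a dict)
def pvLookup : List (String × List (List Int)) → String → Option (List (List Int))
  | [], _ => none
  | p :: t, k => if p.1 == k then some p.2 else pvLookup t k

-- `d[k] = v`: overwrite in place, new keys appended (= Python dict assignment on unique keys)
def pvInsert : List (String × List (List Int)) → String → List (List Int) → List (String × List (List Int))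
  | [], k, v => [(k, v)]
  | p :: t, k, v => if p.1 == k then (k, v) :: t else p :: pvInsert t k v

-- A's inner `for i, value in enumerate(attr_values)` loop: fuel = number of remaining
-- iterations, i the running index, tidx = text_idx, cur the live (mutated) list.
-- When the attribute IS 'shortenable_ids' (aliased = true) Python reads the sid check
-- from the very list being mutated, so the port reads it from `cur`.
-- Out-of-range / empty-sid indexing (Python IndexError) yields the default [] here;
-- such inputs are excluded by Pre_ below.
def pvInnerA (mll : List Int) (aliased : Bool) (sids : List (List Int)) :
    Nat → Nat → Nat → List (List Int) → List (List Int)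
  | 0, _, _, cur => cur
  | f + 1, i, tidx, cur =>
    if ((if aliased then cur else sids).getD i []).headD 0 = 0 then
      pvInnerA mll aliased sids f (i + 1) tidx cur
    else if mll.length ≤ tidx then cur
    else
      let value := cur.getD i []
      if value = [] then pvInnerA mll aliased sids f (i + 1) (tidx + 1) cur
      else
        pvInnerA mll aliased sids f (i + 1) (tidx + 1)
          (if mll.getD tidx 0 < 0 then cur else cur.set i (value.take (mll.getD tidx 0).toNat))

def truncate_by_manual (input_dict : List (String × List (List Int))) (max_len_list : List Int) : List (String × List (List Int)) :=
  let sids0 := (pvLookup input_dict "shortenable_ids").getD []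
  (input_dict.foldl
    (fun st kv =>
      let aliased := kv.1 == "shortenable_ids"
      let vs := if aliased then st.1 else kv.2
      let vs' := pvInnerA max_len_list aliased st.1 vs.length 0 0 vs
      ((if aliased then vs' else st.1), pvInsert st.2 kv.1 vs'))
    (sids0, [("shortenable_ids", sids0)])).2

-- ===== PORT B =====
-- Source B's first loop: per-position limit table (none = leave position unchanged)
def pvLims (mll : List Int) : List (List Int) → Nat → List (Option Int)
  | [], _ => []
  | sid :: rest, t =>
    if sid.headD 0 ≠ 0 then
      if mll.length ≤ t then []
      else some (mll.getD t 0) :: pvLims mll rest (t + 1)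
    else none :: pvLims mll rest t

-- Source B's `cut`: one map over the enumerated values
def pvCut (lims : List (Option Int)) (vs : List (List Int)) : List (List Int) :=
  vs.zipIdx.map (fun vi =>
    match lims.getD vi.2 none with
    | none => vi.1
    | some m => if vi.1 = [] ∨ m < 0 then vi.1 else vi.1.take m.toNat)

def truncate_by_manual_alt (input_dict : List (String × List (List Int))) (max_len_list : List Int) : List (String × List (List Int)) :=
  let sids := (pvLookup input_dict "shortenable_ids").getD []
  let lims := pvLims max_len_list sids 0
  input_dict.foldl (fun out kv => pvInsert out kv.1 (pvCut lims kv.2))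
    [("shortenable_ids", pvCut lims sids)]

-- ===== PRECONDITION & SPEC =====
-- helpers Pre_ is phrased with (no port is reachable from them):
-- number of shortenable positions strictly before index j
def pvCnt (sids : List (List Int)) (j : Nat) : Nat :=
  (sids.take j).countP (fun s => s.headD 0 != 0)

-- position i of the shortenable_ids list `sids` is EMPTIED IN PLACE by A:
-- it is shortenable, gets a limit, and that limit is 0 (value[:0] = [])
def pvEmptied (mll : List Int) (sids : List (List Int)) (i : Nat) : Prop :=
  pvCnt sids i < mll.length ∧ (sids.getD i []).headD 0 ≠ 0 ∧ mll.getD (pvCnt sids i) 0 = 0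

-- Pre_ admits exactly the inputs on which A returns: it excludes duplicate keys (a
-- Python dict cannot represent them), a missing 'shortenable_ids' key (KeyError), and
-- the inputs on which A raises IndexError — an attribute loop reading a position of
-- shortenable_ids that is out of range, holds an empty list, or was emptied in place
-- by a 0 limit while truncating the shared shortenable_ids list (third and fourth
-- conjuncts; a loop reads index i of an attribute iff i is below the attribute's
-- length and at most len(max_len_list) shortenable positions precede it).
def Pre_truncate_by_manual (input_dict : List (String × List (List Int))) (max_len_list : List Int) : Prop :=
  (input_dict.map Prod.fst).Nodup ∧
  "shortenable_ids" ∈ input_dict.map Prod.fst ∧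
  (∀ sv ∈ input_dict, sv.1 = "shortenable_ids" →
    ∀ kv ∈ input_dict, ∀ i < kv.2.length,
      pvCnt sv.2 i ≤ max_len_list.length →
        i < sv.2.length ∧ sv.2.getD i [] ≠ []) ∧
  (∀ pv ∈ input_dict.zipIdx, pv.1.1 = "shortenable_ids" →
    ∀ qv ∈ input_dict.zipIdx, pv.2 < qv.2 →
      ∀ i < qv.1.2.length, ¬ pvEmptied max_len_list pv.1.2 i)

instance (input_dict : List (String × List (List Int))) (max_len_list : List Int) : Decidable (Pre_truncate_by_manual input_dict max_len_list) := by
  unfold Pre_truncate_by_manual pvEmptied; infer_instance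

def pvWitness_truncate_by_manual : (List (String × List (List Int))) × List Int :=
  ([("shortenable_ids", [[1], [0]]), ("a", [[7, 8], [9]])], [1])

def Spec_truncate_by_manual (input_dict : List (String × List (List Int))) (max_len_list : List Int) (out : List (String × List (List Int))) : Prop := out = truncate_by_manual_alt input_dict max_len_list
instance (input_dict : List (String × List (List Int))) (max_len_list : List Int) (out : List (String × List (List Int))) : Decidable (Spec_truncate_by_manual input_dict max_len_list out) := by unfold Spec_truncate_by_manual; infer_instance

-- ===== CLAIM (what is proved, stated in full; the proofs are below) =====
def Claim_equal_truncate_by_manual : Prop := ∀ (input_dict : List (String × List (List Int))) (max_len_list : List Int), Dom_truncate_by_manual input_dict max_len_list → Pre_truncate_by_manual input_dict max_len_list → Spec_truncate_by_manual input_dict max_len_list (truncate_by_manual input_dict max_len_list)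

-- ===== LEMMAS AND PROOFS =====

-- the key/value pairs strictly after the 'shortenable_ids' entry (Python dict order)
def pvSuffixAfterSid : List (String × List (List Int)) → List (String × List (List Int))
  | [] => []
  | p :: t => if p.1 = "shortenable_ids" then t else pvSuffixAfterSid t

theorem pvSuffix_cons (p : String × List (List Int)) (t : List (String × List (List Int))) :
    pvSuffixAfterSid (p :: t) = if p.1 = "shortenable_ids" then t else pvSuffixAfterSid t := rfl

theorem pvGetD_mem (l : List (String × List (List Int))) (p : Nat) (hp : p < l.length) :
    l.getD p ("", []) ∈ l := by
  rw [List.getD_eq_getElem _ _ hp]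
  exact List.getElem_mem _

theorem pvMem_suffix (l : List (String × List (List Int))) (kv : String × List (List Int))
    (h : kv ∈ pvSuffixAfterSid l) :
    ∃ p q, p < q ∧ q < l.length ∧ (l.getD p ("", [])).1 = "shortenable_ids" ∧
      l.getD q ("", []) = kv := by
  induction l with
  | nil => simp [pvSuffixAfterSid] at h
  | cons hd t ih =>
    rw [pvSuffix_cons] at h
    by_cases hk : hd.1 = "shortenable_ids"
    · rw [if_pos hk] at h
      obtain ⟨n, hn, he⟩ := List.getElem_of_mem h
      refine ⟨0, n + 1, by omega, by simp; omega, by simpa using hk, ?_⟩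
      rw [List.getD_cons_succ, List.getD_eq_getElem _ _ hn]
      exact he
    · rw [if_neg hk] at h
      obtain ⟨p, q, h1, h2, h3, h4⟩ := ih h
      exact ⟨p + 1, q + 1, by omega, by simp; omega,
        by rw [List.getD_cons_succ]; exact h3, by rw [List.getD_cons_succ]; exact h4⟩

-- the truncation rule B applies at position j
def pvRule (lims : List (Option Int)) (j : Nat) (v : List Int) : List Int :=
  match lims.getD j none with
  | none => v
  | some m => if v = [] ∨ m < 0 then v else v.take m.toNat

theorem pvRule_nil (lims : List (Option Int)) (j : Nat) : pvRule lims j [] = [] := by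
  unfold pvRule; cases lims.getD j none <;> simp

theorem pvRule_none (lims : List (Option Int)) (j : Nat) (v : List Int)
    (h : lims.getD j none = none) : pvRule lims j v = v := by
  unfold pvRule; rw [h]

theorem pvRule_some (lims : List (Option Int)) (j : Nat) (v : List Int) (m : Int)
    (h : lims.getD j none = some m) :
    pvRule lims j v = if v = [] ∨ m < 0 then v else v.take m.toNat := by
  unfold pvRule; rw [h]

theorem pvCut_eq_map (lims : List (Option Int)) (vs : List (List Int)) :
    pvCut lims vs = vs.zipIdx.map (fun vi => pvRule lims vi.2 vi.1) := rfl

theorem pvCut_length (lims : List (Option Int)) (vs : List (List Int)) :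
    (pvCut lims vs).length = vs.length := by
  simp [pvCut_eq_map]

theorem pvCut_getD (lims : List (Option Int)) (vs : List (List Int)) (j : Nat) :
    (pvCut lims vs).getD j [] = if j < vs.length then pvRule lims j (vs.getD j []) else [] := by
  rw [pvCut_eq_map, List.getD_eq_getElem?_getD, List.getElem?_map, List.getElem?_zipIdx]
  by_cases hj : j < vs.length
  · rw [List.getElem?_eq_getElem hj, if_pos hj, List.getD_eq_getElem _ _ hj]
    simp
  · rw [List.getElem?_eq_none_iff.mpr (by omega), if_neg hj]
    rfl

theorem pvCnt_succ (s : List (List Int)) (i : Nat) :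
    pvCnt s (i + 1) = pvCnt s i + (if (s.getD i []).headD 0 ≠ 0 then 1 else 0) := by
  unfold pvCnt
  rw [List.take_succ, List.countP_append]
  by_cases h : i < s.length
  · rw [List.getElem?_eq_getElem h, List.getD_eq_getElem _ _ h]
    simp [List.countP_cons]
  · rw [List.getElem?_eq_none_iff.mpr (by omega), List.getD_eq_default _ _ (by omega)]
    simp

theorem pvCnt_mono (s : List (List Int)) {i j : Nat} (h : i ≤ j) : pvCnt s i ≤ pvCnt s j := by
  unfold pvCnt
  have h1 : s.take i = (s.take j).take i := by rw [List.take_take, Nat.min_eq_left h]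
  rw [h1]
  conv_rhs => rw [← List.take_append_drop i (s.take j)]
  rw [List.countP_append]
  omega

theorem pvHead_lt (s : List (List Int)) (j : Nat) (h : (s.getD j []).headD 0 ≠ 0) :
    j < s.length := by
  by_contra hj
  rw [List.getD_eq_default _ _ (by omega)] at h
  simp at h

-- characterisation of the limit table
theorem pvLims_getD (mll : List Int) (sids : List (List Int)) (t j : Nat) :
    (pvLims mll sids t).getD j none =
      if j < sids.length ∧ (sids.getD j []).headD 0 ≠ 0 ∧ t + pvCnt sids j < mll.length
      then some (mll.getD (t + pvCnt sids j) 0) else none := by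
  induction sids generalizing t j with
  | nil => simp [pvLims]
  | cons sid rest ih =>
    have hc0 : pvCnt (sid :: rest) 0 = 0 := by simp [pvCnt]
    have hcs : ∀ jj, pvCnt (sid :: rest) (jj + 1) =
        pvCnt rest jj + (if (sid.headD 0 != 0) = true then 1 else 0) := by
      intro jj
      unfold pvCnt
      rw [List.take_succ_cons, List.countP_cons]
    unfold pvLims
    by_cases hh : sid.headD 0 ≠ 0
    · have hbt : (sid.headD 0 != 0) = true := by simpa using hh
      rw [if_pos hh]
      by_cases hl : mll.length ≤ t
      · rw [if_pos hl]
        cases j with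
        | zero =>
          simp only [List.getD_nil]
          rw [if_neg (by rintro ⟨_, _, h3⟩; rw [hc0] at h3; omega)]
        | succ j =>
          simp only [List.getD_nil]
          rw [if_neg (by rintro ⟨_, _, h3⟩; rw [hcs j, hbt] at h3; simp at h3; omega)]
      · rw [if_neg hl]
        cases j with
        | zero =>
          rw [List.getD_cons_zero, hc0]
          rw [if_pos ⟨by simp, by rw [List.getD_cons_zero]; exact hh, by omega⟩]
          norm_num
        | succ j =>
          rw [List.getD_cons_succ, ih (t + 1) j, hcs j, hbt]
          simp only [if_true]
          have e1 : t + (pvCnt rest j + 1) = t + 1 + pvCnt rest j := by omega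
          rw [e1]
          simp only [List.length_cons, Nat.add_lt_add_iff_right, List.getD_cons_succ]
    · push_neg at hh
      have hbf : (sid.headD 0 != 0) = false := by simpa using hh
      rw [if_neg (by simpa using hh)]
      cases j with
      | zero =>
        rw [List.getD_cons_zero]
        rw [if_neg (by rintro ⟨_, h2, _⟩; rw [List.getD_cons_zero] at h2; exact h2 (by simpa using hh))]
      | succ j =>
        rw [List.getD_cons_succ, List.getD_cons_succ, ih t j, hcs j, hbf]
        simp only [Bool.false_eq_true, if_false, Nat.add_zero, List.length_cons,
          Nat.add_lt_add_iff_right]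

theorem pvInnerA_length (mll : List Int) (aliased : Bool) (sids : List (List Int))
    (f i tidx : Nat) (cur : List (List Int)) :
    (pvInnerA mll aliased sids f i tidx cur).length = cur.length := by
  induction f generalizing i tidx cur with
  | zero => rfl
  | succ f ih =>
    unfold pvInnerA
    repeat' split
    all_goals simp [ih, apply_ite List.length]

-- heads of positions the loop actually reads (index in range, not past the break)
-- suffice for the pointwise description of A's inner loop
theorem pvInnerA_getD (mll : List Int) (aliased : Bool) (sidsp sids0 : List (List Int)) :
    ∀ (f i tidx : Nat) (cur : List (List Int)),
      i + f = cur.length →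
      (∀ j, i ≤ j → j < cur.length → pvCnt sids0 j ≤ mll.length →
        ((if aliased then cur else sidsp).getD j []).headD 0 = (sids0.getD j []).headD 0) →
      tidx = pvCnt sids0 i →
      tidx ≤ mll.length →
      ∀ j, (pvInnerA mll aliased sidsp f i tidx cur).getD j [] =
        if i ≤ j then pvRule (pvLims mll sids0 0) j (cur.getD j []) else cur.getD j [] := by
  intro f
  induction f with
  | zero =>
    intro i tidx cur hlen hh ht htb j
    simp only [pvInnerA]
    split
    · rename_i hij
      rw [List.getD_eq_default _ _ (by omega), pvRule_nil]
    · rfl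
  | succ f ih =>
    intro i tidx cur hlen hh ht htb j
    have hicur : i < cur.length := by omega
    have hhc := hh i (le_refl i) hicur (by omega)
    unfold pvInnerA
    by_cases h0 : ((if aliased then cur else sidsp).getD i []).headD 0 = 0
    · rw [if_pos h0]
      have hs0 : (sids0.getD i []).headD 0 = 0 := by rw [← hhc]; exact h0
      have ht' : tidx = pvCnt sids0 (i + 1) := by
        rw [pvCnt_succ, if_neg (by simpa using hs0)]; omega
      have hnone : (pvLims mll sids0 0).getD i none = none := by
        rw [pvLims_getD]
        exact if_neg (by rintro ⟨_, hne, _⟩; exact hne hs0)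
      rw [ih (i + 1) tidx cur (by omega) (fun j h1 h2 h3 => hh j (by omega) h2 h3) ht' htb j]
      by_cases hij : i ≤ j
      · by_cases hij' : i + 1 ≤ j
        · rw [if_pos hij', if_pos hij]
        · obtain rfl : i = j := by omega
          rw [if_neg hij', if_pos hij, pvRule_none _ _ _ hnone]
      · rw [if_neg (by omega), if_neg hij]
    · rw [if_neg h0]
      have hsne : (sids0.getD i []).headD 0 ≠ 0 := by rw [← hhc]; exact h0
      by_cases hbrk : mll.length ≤ tidx
      · rw [if_pos hbrk]
        by_cases hij : i ≤ j
        · rw [if_pos hij]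
          have hnone : (pvLims mll sids0 0).getD j none = none := by
            rw [pvLims_getD]
            refine if_neg ?_
            rintro ⟨_, _, hlt⟩
            have := pvCnt_mono sids0 hij
            omega
          rw [pvRule_none _ _ _ hnone]
        · rw [if_neg hij]
      · rw [if_neg hbrk]
        have ht' : tidx + 1 = pvCnt sids0 (i + 1) := by
          rw [pvCnt_succ, if_pos hsne]; omega
        have htb' : tidx + 1 ≤ mll.length := by omega
        by_cases hval : cur.getD i [] = []
        · simp only [if_pos hval]
          rw [ih (i + 1) (tidx + 1) cur (by omega) (fun j h1 h2 h3 => hh j (by omega) h2 h3) ht' htb' j]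
          by_cases hij : i ≤ j
          · by_cases hij' : i + 1 ≤ j
            · rw [if_pos hij', if_pos hij]
            · obtain rfl : i = j := by omega
              rw [if_neg hij', if_pos hij, hval, pvRule_nil]
          · rw [if_neg (by omega), if_neg hij]
        · simp only [if_neg hval]
          set m := mll.getD tidx 0 with hm
          set cur' := if m < 0 then cur else cur.set i ((cur.getD i []).take m.toNat) with hcur'
          have hclen : cur'.length = cur.length := by
            rw [hcur']; split
            · rfl
            · rw [List.length_set]
          have hkeep : ∀ j, j ≠ i → cur'.getD j [] = cur.getD j [] := by
            intro j hji
            rw [hcur']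
            split
            · rfl
            · rw [List.getD_eq_getElem?_getD, List.getElem?_set_ne (by omega),
                ← List.getD_eq_getElem?_getD]
          have hh' : ∀ j, i + 1 ≤ j → j < cur'.length → pvCnt sids0 j ≤ mll.length →
              ((if aliased then cur' else sidsp).getD j []).headD 0 = (sids0.getD j []).headD 0 := by
            intro j hj h2 h3
            cases aliased with
            | false => exact hh j (by omega) (by omega) h3
            | true =>
              simp only [if_pos] at hh ⊢
              rw [hkeep j (by omega)]
              exact hh j (by omega) (by omega) h3
          have hlen' : i + 1 + f = cur'.length := by rw [hclen]; omega
          rw [ih (i + 1) (tidx + 1) cur' hlen' hh' ht' htb' j]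
          have hsome : (pvLims mll sids0 0).getD i none = some m := by
            rw [pvLims_getD]
            have hjlt : i < sids0.length := pvHead_lt sids0 i hsne
            rw [if_pos ⟨hjlt, hsne, by omega⟩]
            have e : 0 + pvCnt sids0 i = tidx := by omega
            rw [e, hm]
          by_cases hij : i ≤ j
          · by_cases hij' : i + 1 ≤ j
            · rw [if_pos hij', if_pos hij, hkeep j (by omega)]
            · obtain rfl : i = j := by omega
              rw [if_neg hij', if_pos hij]
              have hset : cur'.getD i [] =
                  if m < 0 then cur.getD i [] else (cur.getD i []).take m.toNat := by
                rw [hcur']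
                split
                · rfl
                · rw [List.getD_eq_getElem?_getD, List.getElem?_set_self (by omega)]
                  rfl
              rw [hset, pvRule_some _ _ _ _ hsome]
              by_cases hmlt : m < 0
              · rw [if_pos hmlt, if_pos (Or.inr hmlt)]
              · rw [if_neg hmlt, if_neg (by push_neg; exact ⟨hval, by omega⟩)]
          · rw [if_neg (by omega), if_neg hij, hkeep j (by omega)]

theorem pvInnerA_eq_pvCut (mll : List Int) (aliased : Bool) (sidsp sids0 : List (List Int))
    (vs : List (List Int))
    (hh : ∀ j, j < vs.length → pvCnt sids0 j ≤ mll.length →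
      ((if aliased then vs else sidsp).getD j []).headD 0 = (sids0.getD j []).headD 0) :
    pvInnerA mll aliased sidsp vs.length 0 0 vs = pvCut (pvLims mll sids0 0) vs := by
  have hlen := pvInnerA_length mll aliased sidsp vs.length 0 0 vs
  have hpt := pvInnerA_getD mll aliased sidsp sids0 vs.length 0 0 vs (by omega)
    (fun j _ h2 h3 => hh j h2 h3) (by simp [pvCnt]) (by omega)
  apply List.ext_getElem (by rw [hlen, pvCut_length])
  intro n h1 h2
  have hn : n < vs.length := by rw [hlen] at h1; exact h1
  have hA := hpt n
  rw [if_pos (Nat.zero_le n)] at hA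
  have hB := pvCut_getD (pvLims mll sids0 0) vs n
  rw [if_pos hn] at hB
  rw [← List.getD_eq_getElem _ [] h1, ← List.getD_eq_getElem _ [] h2, hA, hB]

-- truncating shortenable_ids preserves the head at every position that is not emptied in place
theorem pvCut_head (mll : List Int) (sids0 : List (List Int)) (j : Nat)
    (hnem : ¬ pvEmptied mll sids0 j) :
    ((pvCut (pvLims mll sids0 0) sids0).getD j []).headD 0 = (sids0.getD j []).headD 0 := by
  by_cases hj : j < sids0.length
  · rw [pvCut_getD, if_pos hj]
    by_cases hcond : j < sids0.length ∧ (sids0.getD j []).headD 0 ≠ 0 ∧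
        0 + pvCnt sids0 j < mll.length
    · have hsome : (pvLims mll sids0 0).getD j none = some (mll.getD (0 + pvCnt sids0 j) 0) := by
        rw [pvLims_getD, if_pos hcond]
      rw [pvRule_some _ _ _ _ hsome]
      set m := mll.getD (0 + pvCnt sids0 j) 0 with hm
      have hm0 : m ≠ 0 := by
        intro hmz
        exact hnem ⟨by omega, hcond.2.1, by rw [show pvCnt sids0 j = 0 + pvCnt sids0 j from by omega, ← hm]; exact hmz⟩
      by_cases hv : sids0.getD j [] = [] ∨ m < 0
      · rw [if_pos hv]
      · rw [if_neg hv]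
        push_neg at hv
        obtain ⟨hvne, hmnn⟩ := hv
        cases hval : sids0.getD j [] with
        | nil => exact absurd hval hvne
        | cons a t =>
          obtain ⟨k, hk⟩ : ∃ k, m.toNat = k + 1 := ⟨m.toNat - 1, by omega⟩
          rw [hk, List.take_succ_cons, List.headD_cons, List.headD_cons]
    · have hnone : (pvLims mll sids0 0).getD j none = none := by
        rw [pvLims_getD, if_neg hcond]
      rw [pvRule_none _ _ _ hnone]
  · rw [pvCut_getD, if_neg hj, List.getD_eq_default _ _ (by omega)]

theorem pvLookup_val (l : List (String × List (List Int))) (hnd : (l.map Prod.fst).Nodup)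
    (kv : String × List (List Int)) (hm : kv ∈ l) : pvLookup l kv.1 = some kv.2 := by
  induction l with
  | nil => simp at hm
  | cons p t ih =>
    rcases List.mem_cons.mp hm with h | h
    · subst h
      unfold pvLookup
      rw [if_pos (by simp)]
    · have hne : p.1 ≠ kv.1 := by
        intro he
        have : kv.1 ∈ t.map Prod.fst := List.mem_map_of_mem h
        rw [← he] at this
        exact (List.nodup_cons.mp hnd).1 this
      unfold pvLookup
      rw [if_neg (by simp [hne])]
      exact ih (List.nodup_cons.mp hnd).2 h

theorem pvKeyUnique (l : List (String × List (List Int))) (hnd : (l.map Prod.fst).Nodup)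
    (a b : String × List (List Int)) (ha : a ∈ l) (hb : b ∈ l) (hk : a.1 = b.1) : a.2 = b.2 := by
  have h1 := pvLookup_val l hnd a ha
  have h2 := pvLookup_val l hnd b hb
  rw [hk] at h1
  exact Option.some.inj (h1.symm.trans h2)

theorem pvFold_eq (mll : List Int) (sids0 : List (List Int)) :
    ∀ (l : List (String × List (List Int))) (sc : List (List Int))
      (outA outB : List (String × List (List Int))),
      (∀ kv ∈ l, kv.1 = "shortenable_ids" → kv.2 = sids0) →
      (l.map Prod.fst).Nodup →
      (("shortenable_ids" ∈ l.map Prod.fst ∧ sc = sids0 ∧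
        (∀ kv ∈ pvSuffixAfterSid l, ∀ i < kv.2.length, ¬ pvEmptied mll sids0 i) ∧
        ∃ tail, outA = ("shortenable_ids", sids0) :: tail ∧
                outB = ("shortenable_ids", pvCut (pvLims mll sids0 0) sids0) :: tail) ∨
       (("shortenable_ids" ∉ l.map Prod.fst) ∧ sc = pvCut (pvLims mll sids0 0) sids0 ∧
        (∀ kv ∈ l, ∀ i < kv.2.length, ¬ pvEmptied mll sids0 i) ∧ outA = outB)) →
      (l.foldl
        (fun st kv =>
          let aliased := kv.1 == "shortenable_ids"
          let vs := if aliased then st.1 else kv.2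
          let vs' := pvInnerA mll aliased st.1 vs.length 0 0 vs
          ((if aliased then vs' else st.1), pvInsert st.2 kv.1 vs'))
        (sc, outA)).2 =
      l.foldl (fun out kv => pvInsert out kv.1 (pvCut (pvLims mll sids0 0) kv.2)) outB := by
  intro l
  induction l with
  | nil =>
    intro sc outA outB hv hnd hinv
    rcases hinv with ⟨hmem, _⟩ | ⟨_, _, _, hAB⟩
    · simp at hmem
    · simpa using hAB
  | cons kv rest ih =>
    obtain ⟨ka, va⟩ := kv
    intro sc outA outB hv hnd hinv
    simp only [List.foldl_cons]
    rcases hinv with ⟨hmem, hsc, hEmp, tail, hA, hB⟩ | ⟨hnm, hsc, hEmp, hAB⟩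
    · by_cases hk : ka = "shortenable_ids"
      · have hbeq : (ka == "shortenable_ids") = true := beq_iff_eq.mpr hk
        have hkv2 : va = sids0 := hv (ka, va) List.mem_cons_self hk
        simp only [hbeq, if_pos, hsc, hA, hB, hkv2]
        have hvs' : pvInnerA mll true sids0 sids0.length 0 0 sids0 =
            pvCut (pvLims mll sids0 0) sids0 :=
          pvInnerA_eq_pvCut mll true sids0 sids0 sids0 (fun j _ _ => by simp)
        rw [hvs']
        have hins : ∀ (x : List (List Int)),
            pvInsert (("shortenable_ids", x) :: tail) ka (pvCut (pvLims mll sids0 0) sids0) =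
            (ka, pvCut (pvLims mll sids0 0) sids0) :: tail := by
          intro x
          unfold pvInsert
          rw [if_pos (by simp [hk])]
        rw [hins, hins]
        apply ih _ _ _ (fun p hp h => hv p (List.mem_cons_of_mem _ hp) h)
          (List.nodup_cons.mp hnd).2
        right
        refine ⟨hk ▸ (List.nodup_cons.mp hnd).1, rfl, ?_, rfl⟩
        have hsfx : pvSuffixAfterSid ((ka, va) :: rest) = rest := by
          rw [pvSuffix_cons, if_pos hk]
        rw [hsfx] at hEmp
        exact hEmp
      · have hbeq : (ka == "shortenable_ids") = false := by simp [hk]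
        simp only [hbeq, Bool.false_eq_true, if_false, hsc, hA, hB]
        have hvs' : pvInnerA mll false sids0 va.length 0 0 va =
            pvCut (pvLims mll sids0 0) va :=
          pvInnerA_eq_pvCut mll false sids0 sids0 va (fun j _ _ => by simp)
        rw [hvs']
        have hins1 : ∀ (x : List (List Int)),
            pvInsert (("shortenable_ids", x) :: tail) ka (pvCut (pvLims mll sids0 0) va) =
            ("shortenable_ids", x) :: pvInsert tail ka (pvCut (pvLims mll sids0 0) va) := by
          intro x
          rw [pvInsert]
          rw [if_neg (by simp; intro h; exact hk h.symm)]
        rw [hins1, hins1]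
        apply ih _ _ _ (fun p hp h => hv p (List.mem_cons_of_mem _ hp) h)
          (List.nodup_cons.mp hnd).2
        left
        refine ⟨?_, rfl, ?_, pvInsert tail ka (pvCut (pvLims mll sids0 0) va), rfl, rfl⟩
        · rcases List.mem_cons.mp hmem with h | h
          · exact absurd h.symm hk
          · exact h
        · have hsfx : pvSuffixAfterSid ((ka, va) :: rest) = pvSuffixAfterSid rest := by
            rw [pvSuffix_cons, if_neg hk]
          rw [hsfx] at hEmp
          exact hEmp
    · have hk : ka ≠ "shortenable_ids" := by
        intro he
        exact hnm (by rw [← he]; exact List.mem_cons_self)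
      have hbeq : (ka == "shortenable_ids") = false := by simp [hk]
      simp only [hbeq, Bool.false_eq_true, if_false, hsc, hAB]
      have hvs' : pvInnerA mll false (pvCut (pvLims mll sids0 0) sids0) va.length 0 0 va =
          pvCut (pvLims mll sids0 0) va :=
        pvInnerA_eq_pvCut mll false (pvCut (pvLims mll sids0 0) sids0) sids0 va
          (fun j hj _ => by
            simpa using pvCut_head mll sids0 j (hEmp (ka, va) List.mem_cons_self j hj))
      rw [hvs']
      apply ih _ _ _ (fun p hp h => hv p (List.mem_cons_of_mem _ hp) h)
        (List.nodup_cons.mp hnd).2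
      right
      exact ⟨fun h => hnm (List.mem_cons_of_mem _ h), rfl,
        fun p hp => hEmp p (List.mem_cons_of_mem _ hp), rfl⟩

-- ===== VERDICT (by name: the statement is the Claim_ definition above) =====
theorem truncate_by_manual_spec : Claim_equal_truncate_by_manual := by
  intro input_dict mll _ hpre
  obtain ⟨hnd, hmem, _, h4⟩ := hpre
  unfold Spec_truncate_by_manual truncate_by_manual truncate_by_manual_alt
  obtain ⟨sv, hsvm, hsvk⟩ : ∃ sv ∈ input_dict, sv.1 = "shortenable_ids" := by
    rcases List.mem_map.mp hmem with ⟨p, hp, hpk⟩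
    exact ⟨p, hp, hpk⟩
  have hsv2 : (pvLookup input_dict "shortenable_ids").getD [] = sv.2 := by
    have := pvLookup_val input_dict hnd sv hsvm
    rw [hsvk] at this
    rw [this]
    rfl
  refine pvFold_eq mll _ input_dict _ _ _
    (fun kv hm hk => by
      have := pvLookup_val input_dict hnd kv hm
      rw [hk] at this; rw [this]; rfl)
    hnd
    (Or.inl ⟨hmem, rfl, ?_, [], rfl, rfl⟩)
  intro kv hkv i hi
  obtain ⟨p, q, hpq, hq, hpk, hqv⟩ := pvMem_suffix input_dict kv hkv
  have hpl : p < input_dict.length := by omega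
  have hpz : (input_dict.getD p ("", []), p) ∈ input_dict.zipIdx := by
    rw [List.mk_mem_zipIdx_iff_getElem?, List.getElem?_eq_getElem hpl,
      List.getD_eq_getElem _ _ hpl]
  have hqz : (input_dict.getD q ("", []), q) ∈ input_dict.zipIdx := by
    rw [List.mk_mem_zipIdx_iff_getElem?, List.getElem?_eq_getElem hq,
      List.getD_eq_getElem _ _ hq]
  have h2 : (input_dict.getD p ("", [])).2 = sv.2 :=
    pvKeyUnique input_dict hnd _ sv (pvGetD_mem _ p hpl) hsvm (by rw [hpk, hsvk])
  have h3 := h4 _ hpz hpk _ hqz hpq i (by rw [hqv]; exact hi)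
  rw [h2] at h3
  rw [hsv2]
  exact h3
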